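-- pv_equiv track=rewrite | github.com/LYX999-star/ESEM22-Data | src/bug_fix_collection/bug_fix_collection.py | ranked_by_files_dict
-- ===== SOURCE A (Python) =====
-- import operator
--
-- def ranked_by_files_dict(files_dict):
--     sorted_files_dict = sorted(files_dict.items(), key=operator.itemgetter(1), reverse=True)
--     ranked_files = []
--     for i in range(1, 11):
--         ranked_x = []
--         for k in sorted_files_dict[:int(len(sorted_files_dict) * 0.1 * i)]:
--             ranked_x.append(k[0])
--
--         ranked_files.append(ranked_x)
--
--     return ranked_files
-- ===== SOURCE B (Python) =====
-- import operator
--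
-- def ranked_by_files_dict(files_dict):
--     keys = [kv[0] for kv in sorted(files_dict.items(), key=operator.itemgetter(1), reverse=True)]
--     n = len(keys)
--     ranked_files = []
--     running = []
--     prev = 0
--     for i in range(1, 11):
--         cut = int(n * 0.1 * i)
--         running.extend(keys[prev:cut])
--         prev = cut
--         ranked_files.append(list(running))
--     return ranked_files
-- ===== Notes on version B (the rewrite author's own statement) =====
-- stated objective: alternative
-- what changed: B extracts the sorted key list once and makes a single incremental pass with a running cumulative bucket, extending it by the slice between consecutive percentile cutoffs, instead of re-scanning the sorted list from the start for each of the ten percentiles.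
import Mathlib
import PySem

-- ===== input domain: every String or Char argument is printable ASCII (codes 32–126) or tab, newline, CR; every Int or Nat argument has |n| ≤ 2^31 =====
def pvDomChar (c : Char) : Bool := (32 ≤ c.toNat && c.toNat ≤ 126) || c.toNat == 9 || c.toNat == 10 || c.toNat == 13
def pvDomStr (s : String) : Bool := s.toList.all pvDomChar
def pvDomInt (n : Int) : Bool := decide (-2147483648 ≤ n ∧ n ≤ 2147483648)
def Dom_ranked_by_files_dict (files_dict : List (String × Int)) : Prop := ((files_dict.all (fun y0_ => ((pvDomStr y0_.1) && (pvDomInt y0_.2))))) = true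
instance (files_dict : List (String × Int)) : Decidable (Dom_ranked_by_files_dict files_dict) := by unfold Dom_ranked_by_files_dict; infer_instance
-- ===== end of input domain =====

-- B replaces A's ten from-the-start prefix re-scans of the sorted key list by one incremental
-- accumulator pass over the slices between consecutive percentile cutoffs (alternative decomposition).


-- Shared helper: exact emulation of the IEEE-double expression int(n * 0.1 * i) that BOTH Pythons
-- contain verbatim.  pvRnd53 p rounds the integer p to 53 significant bits, round-half-to-even —
-- exactly the rounding a double multiplication performs (no overflow/subnormals in range).
-- 3602879701896397 * 2^-55 is the double literal 0.1; n*0.1 rounds n*C at scale 2^-55, the further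
-- product by i rounds again at the same scale, and int() truncates (= floor, values are ≥ 0).
def pvRnd53 (p : Nat) : Nat :=
  if Nat.log2 p + 1 ≤ 53 then p
  else
    (if 2 ^ (Nat.log2 p + 1 - 53 - 1) < p % 2 ^ (Nat.log2 p + 1 - 53)
        ∨ (p % 2 ^ (Nat.log2 p + 1 - 53) = 2 ^ (Nat.log2 p + 1 - 53 - 1)
           ∧ (p / 2 ^ (Nat.log2 p + 1 - 53)) % 2 = 1)
     then p / 2 ^ (Nat.log2 p + 1 - 53) + 1 else p / 2 ^ (Nat.log2 p + 1 - 53))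
    * 2 ^ (Nat.log2 p + 1 - 53)

-- pvCut n i = int(n * 0.1 * i) computed in double arithmetic (n = len, i ∈ 1..10)
def pvCut (n i : Nat) : Nat := pvRnd53 (pvRnd53 (n * 3602879701896397) * i) / 2 ^ 55

-- ===== PORT A =====
def ranked_by_files_dict (files_dict : List (String × Int)) : List (List String) :=
  let sorted_files_dict := PySem.List.sorted files_dict (fun kv => kv.2) true
  (PySem.List.pyRange 1 11 1).foldl (fun ranked_files i =>
    let ranked_x :=
      (PySem.List.slice sorted_files_dict none
          (some ((pvCut sorted_files_dict.length i.toNat : Nat) : Int))).foldl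
        (fun ranked_x k => ranked_x ++ [k.1]) []
    ranked_files ++ [ranked_x]) []

-- ===== PORT B =====
def ranked_by_files_dict_alt (files_dict : List (String × Int)) : List (List String) :=
  let keys := (PySem.List.sorted files_dict (fun kv => kv.2) true).map (fun kv => kv.1)
  let n := keys.length
  ((PySem.List.pyRange 1 11 1).foldl
    (fun (st : List (List String) × List String × Nat) i =>
      let cut := pvCut n i.toNat
      -- keys[prev:cut] = (keys.drop prev).take (cut - prev)  (PySem.List.slice_natCast)
      let running := st.2.1 ++ (keys.drop st.2.2).take (cut - st.2.2)
      (st.1 ++ [running], running, cut))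
    ([], [], 0)).1

-- ===== PRECONDITION & SPEC =====
def Spec_ranked_by_files_dict (files_dict : List (String × Int)) (out : List (List String)) : Prop := out = ranked_by_files_dict_alt files_dict
instance (files_dict : List (String × Int)) (out : List (List String)) : Decidable (Spec_ranked_by_files_dict files_dict out) := by unfold Spec_ranked_by_files_dict; infer_instance

-- ===== CLAIM (what is proved, stated in full; the proofs are below) =====
def Claim_equal_ranked_by_files_dict : Prop := ∀ (files_dict : List (String × Int)), Dom_ranked_by_files_dict files_dict → Spec_ranked_by_files_dict files_dict (ranked_by_files_dict files_dict)

-- ===== LEMMAS AND PROOFS =====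

lemma pv_log2_lt (x : Nat) : x < 2 ^ (Nat.log2 x + 1) := Nat.lt_log2_self

lemma pv_log2_le {x : Nat} (hx : x ≠ 0) : 2 ^ Nat.log2 x ≤ x := Nat.log2_self_le hx

-- all facts needed about pvRnd53 on a >53-bit input, k := log2 x + 1 - 53
lemma pvRnd53_big (x : Nat) (hx : 53 < Nat.log2 x + 1) :
    2 ^ (Nat.log2 x + 1 - 53) ∣ pvRnd53 x ∧
    pvRnd53 x ≤ x + 2 ^ (Nat.log2 x - 53) ∧
    x ≤ pvRnd53 x + 2 ^ (Nat.log2 x - 53) ∧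
    2 ^ Nat.log2 x ≤ pvRnd53 x ∧
    pvRnd53 x ≤ 2 ^ (Nat.log2 x + 1) := by
  have hxne : x ≠ 0 := by
    intro h; subst h; simp [Nat.log2] at hx
  have hxlow : 2 ^ Nat.log2 x ≤ x := pv_log2_le hxne
  have hxhi : x < 2 ^ (Nat.log2 x + 1) := pv_log2_lt x
  set L := Nat.log2 x with hL
  set k := L + 1 - 53 with hk
  have hL53 : L = 52 + k := by omega
  have hLk : L - 53 = k - 1 := by omega
  set K := 2 ^ k with hKdef
  set H := 2 ^ (k - 1) with hHdef
  have hKH : K = 2 * H := by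
    have hk1 : k - 1 + 1 = k := by omega
    rw [hKdef, hHdef]
    conv_lhs => rw [← hk1]
    rw [pow_succ, Nat.mul_comm]
  have hpos : 0 < K := Nat.two_pow_pos k
  set Q := x / K with hQ
  set R := x % K with hR
  have hx2 : Q * K + R = x := by rw [hQ, hR, Nat.mul_comm]; exact Nat.div_add_mod x K
  have hrlt : R < K := Nat.mod_lt _ hpos
  have h2L : (2 : Nat) ^ L = 2 ^ 52 * K := by rw [hKdef, hL53]; ring
  have h2L1 : (2 : Nat) ^ (L + 1) = 2 ^ 53 * K := by rw [hKdef, hL53]; ring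
  have hqhi : Q < 2 ^ 53 := by
    rw [hQ, Nat.div_lt_iff_lt_mul hpos]; omega
  have hqlow : 2 ^ 52 ≤ Q := by
    rw [hQ, Nat.le_div_iff_mul_le hpos]; omega
  have h52K : 2 ^ 52 * K ≤ Q * K := Nat.mul_le_mul_right K hqlow
  have h53K : (Q + 1) * K ≤ 2 ^ 53 * K := Nat.mul_le_mul_right K (by omega)
  have he : (Q + 1) * K = Q * K + K := by ring
  have hrnd : pvRnd53 x =
      (if H < R ∨ (R = H ∧ Q % 2 = 1) then Q + 1 else Q) * K := by
    unfold pvRnd53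
    rw [if_neg (by omega)]
  rw [hrnd, hLk]
  rw [he] at h53K
  split_ifs with hc
  · have hHR : H ≤ R := by rcases hc with h | ⟨h, _⟩ <;> omega
    refine ⟨dvd_mul_left K (Q + 1), ?_, ?_, ?_, ?_⟩
    · rw [he]; omega
    · rw [he]; omega
    · rw [h2L, he]; omega
    · rw [h2L1, he]; omega
  · have hRH : R ≤ H := by
      by_contra hgt
      exact hc (Or.inl (by omega))
    refine ⟨dvd_mul_left K Q, ?_, ?_, ?_, ?_⟩
    · omega
    · omega
    · rw [h2L]; omega
    · rw [h2L1]; omega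

lemma pvRnd53_small {x : Nat} (hx : Nat.log2 x + 1 ≤ 53) : pvRnd53 x = x := by
  unfold pvRnd53; rw [if_pos hx]

lemma pv_log2_mono {p q : Nat} (h : p ≤ q) (hp : p ≠ 0) : Nat.log2 p ≤ Nat.log2 q := by
  by_contra hlt
  have h1 : 2 ^ Nat.log2 p ≤ p := pv_log2_le hp
  have h2 : q < 2 ^ (Nat.log2 q + 1) := pv_log2_lt q
  have h3 : 2 ^ (Nat.log2 q + 1) ≤ 2 ^ Nat.log2 p :=
    Nat.pow_le_pow_right (by norm_num) (by omega)
  omega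

lemma pvRnd53_mono {p q : Nat} (h : p ≤ q) : pvRnd53 p ≤ pvRnd53 q := by
  by_cases hp : Nat.log2 p + 1 ≤ 53
  · by_cases hq : Nat.log2 q + 1 ≤ 53
    · rw [pvRnd53_small hp, pvRnd53_small hq]; exact h
    · -- p fits in 53 bits, q does not: rnd p = p < 2^53 ≤ 2^(log2 q) ≤ rnd q
      obtain ⟨_, _, _, hqlow, _⟩ := pvRnd53_big q (by omega)
      have h1 : p < 2 ^ (Nat.log2 p + 1) := pv_log2_lt p
      have h2 : 2 ^ (Nat.log2 p + 1) ≤ 2 ^ (53 : Nat) :=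
        Nat.pow_le_pow_right (by norm_num) hp
      have h3 : 2 ^ (53 : Nat) ≤ 2 ^ Nat.log2 q :=
        Nat.pow_le_pow_right (by norm_num) (by omega)
      rw [pvRnd53_small hp]
      omega
  · have hpne : p ≠ 0 := by
      intro h0; subst h0; simp [Nat.log2] at hp
    have hq : ¬ (Nat.log2 q + 1 ≤ 53) := by
      have := pv_log2_mono h hpne; omega
    obtain ⟨hdp, hup, hlp, hglp, hghp⟩ := pvRnd53_big p (by omega)
    obtain ⟨hdq, huq, hlq, hglq, hghq⟩ := pvRnd53_big q (by omega)
    by_cases hll : Nat.log2 p = Nat.log2 q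
    · -- same binade, same grid 2^k: round-to-nearest on a common grid is monotone
      rw [hll] at hdp hup hlp
      by_contra hlt
      rw [not_le] at hlt
      have hdvd : 2 ^ (Nat.log2 q + 1 - 53) ∣ pvRnd53 p - pvRnd53 q := Nat.dvd_sub hdp hdq
      have hge : 2 ^ (Nat.log2 q + 1 - 53) ≤ pvRnd53 p - pvRnd53 q :=
        Nat.le_of_dvd (by omega) hdvd
      have h2k : 2 ^ (Nat.log2 q + 1 - 53) = 2 * 2 ^ (Nat.log2 q - 53) := by
        have hk1 : 1 ≤ Nat.log2 q + 1 - 53 := by omega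
        conv_lhs => rw [show Nat.log2 q + 1 - 53 = (Nat.log2 q - 53) + 1 by omega]
        ring
      -- rnd q + 2h ≤ rnd p ≤ p + h, q ≤ rnd q + h, p ≤ q  forces p = q
      have hpq : p = q := by omega
      subst hpq
      omega
    · -- strictly lower binade: rnd p ≤ 2^(log2 p + 1) ≤ 2^(log2 q) ≤ rnd q
      have hlt : Nat.log2 p < Nat.log2 q := lt_of_le_of_ne (pv_log2_mono h hpne) hll
      have : 2 ^ (Nat.log2 p + 1) ≤ 2 ^ Nat.log2 q :=
        Nat.pow_le_pow_right (by norm_num) (by omega)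
      omega

lemma pvCut_mono (n : Nat) {i j : Nat} (h : i ≤ j) : pvCut n i ≤ pvCut n j :=
  Nat.div_le_div_right (pvRnd53_mono (Nat.mul_le_mul_left _ h))

-- the append-accumulating foldl is a map
lemma pv_foldl_push {α β : Type} (f : α → β) (l : List α) (a : List β) :
    l.foldl (fun acc x => acc ++ [f x]) a = a ++ l.map f := by
  induction l generalizing a with
  | nil => simp
  | cons x xs ih => simp [ih]

-- gluing consecutive slices: prefix up to p plus keys[p:c] is the prefix up to c
lemma pv_take_glue (keys : List String) {p c : Nat} (hpc : p ≤ c) :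
    keys.take p ++ (keys.drop p).take (c - p) = keys.take c := by
  have e : p + (c - p) = c := by omega
  rw [← List.take_add, e]

-- B's accumulator pass over a chainwise-monotone cutoff sequence produces the prefixes
lemma pv_bfold (keys : List String) (n : Nat) (is : List Int) :
    ∀ (res : List (List String)) (p : Nat),
      List.Chain (· ≤ ·) p (is.map (fun i => pvCut n i.toNat)) →
      (List.foldl (fun (st : List (List String) × List String × Nat) i =>
          (st.1 ++ [st.2.1 ++ (keys.drop st.2.2).take (pvCut n i.toNat - st.2.2)],
           st.2.1 ++ (keys.drop st.2.2).take (pvCut n i.toNat - st.2.2),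
           pvCut n i.toNat))
        (res, keys.take p, p) is).1
      = res ++ is.map (fun i => keys.take (pvCut n i.toNat)) := by
  induction is with
  | nil => intro res p _; simp
  | cons i is ih =>
    intro res p hch
    rw [List.map_cons] at hch
    obtain ⟨hpc, hch⟩ := List.chain_cons.mp hch
    simp only [List.foldl_cons, List.map_cons]
    rw [pv_take_glue keys hpc, ih (res ++ [keys.take (pvCut n i.toNat)]) (pvCut n i.toNat) hch]
    simp

-- the whole computation after unfolding both ports, over an arbitrary (sorted) list s
lemma pv_main (s : List (String × Int)) :
    List.foldl (fun ranked_files i => ranked_files ++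
        [(PySem.List.slice s none
            (some ((pvCut s.length i.toNat : Nat) : Int))).foldl
          (fun ranked_x k => ranked_x ++ [k.1]) []])
      [] [(1 : Int), 2, 3, 4, 5, 6, 7, 8, 9, 10]
    = (List.foldl (fun (st : List (List String) × List String × Nat) i =>
          (st.1 ++ [st.2.1 ++ (((s.map (fun kv => kv.1)).drop st.2.2).take
              (pvCut (s.map (fun kv => kv.1)).length i.toNat - st.2.2))],
           st.2.1 ++ (((s.map (fun kv => kv.1)).drop st.2.2).take
              (pvCut (s.map (fun kv => kv.1)).length i.toNat - st.2.2)),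
           pvCut (s.map (fun kv => kv.1)).length i.toNat))
        ([], [], 0) [(1 : Int), 2, 3, 4, 5, 6, 7, 8, 9, 10]).1 := by
  have hinner : ∀ c : Nat,
      (PySem.List.slice s none (some ((c : Nat) : Int))).foldl
        (fun ranked_x k => ranked_x ++ [k.1]) []
      = (s.map (fun kv => kv.1)).take c := by
    intro c
    rw [PySem.List.slice_to_natCast, pv_foldl_push (fun kv : String × Int => kv.1),
      List.map_take, List.nil_append]
  have hch : List.Chain (· ≤ ·) 0
      (([(1 : Int), 2, 3, 4, 5, 6, 7, 8, 9, 10]).map (fun i => pvCut s.length i.toNat)) := by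
    simp only [List.map_cons, List.map_nil]
    exact .cons (Nat.zero_le _)
      (.cons (pvCut_mono s.length (by omega)) (.cons (pvCut_mono s.length (by omega))
      (.cons (pvCut_mono s.length (by omega)) (.cons (pvCut_mono s.length (by omega))
      (.cons (pvCut_mono s.length (by omega)) (.cons (pvCut_mono s.length (by omega))
      (.cons (pvCut_mono s.length (by omega)) (.cons (pvCut_mono s.length (by omega))
      (.cons (pvCut_mono s.length (by omega)) .nil)))))))))
  have hB := pv_bfold (s.map (fun kv => kv.1)) s.length
      [(1 : Int), 2, 3, 4, 5, 6, 7, 8, 9, 10] [] 0 hch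
  rw [List.take_zero] at hB
  simp only [List.length_map]
  rw [hB, pv_foldl_push (fun i : Int =>
      (PySem.List.slice s none
          (some ((pvCut s.length i.toNat : Nat) : Int))).foldl
        (fun ranked_x k => ranked_x ++ [k.1]) [])]
  simp only [hinner, List.nil_append]

theorem ranked_by_files_dict_spec : Claim_equal_ranked_by_files_dict := by
  intro files_dict _
  unfold Spec_ranked_by_files_dict ranked_by_files_dict ranked_by_files_dict_alt
  have hr : PySem.List.pyRange 1 11 1 = [1, 2, 3, 4, 5, 6, 7, 8, 9, 10] := by
    rw [PySem.List.pyRange_one]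
    norm_num [show (Int.toNat 10 : Nat) = 10 from rfl, List.range_succ]
  rw [hr]
  exact pv_main (PySem.List.sorted files_dict (fun kv => kv.2) true)
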